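-- pv_equiv track=rewrite | github.com/Gyndara/Python | rekursif.py | SukuKeN
-- ===== SOURCE A (Python) =====
-- def SukuKeN(N):
--     if (N == 1):
--         return 1
--     else:
--         if (N == 2):
--             return 3
--         else:
--             if (N % 2 == 1):
--                 return SukuKeN(N-2) * SukuKeN(N-1)
--             else:
--                 return SukuKeN(N-2) + SukuKeN(N-1)
-- ===== SOURCE B (Python) =====
-- def SukuKeN(N):
--     if N == 1:
--         return 1
--     a, b = 1, 3
--     for k in range(3, N + 1):
--         a, b = b, (a * b if k % 2 == 1 else a + b)
--     return b
-- ===== Notes on version B (the rewrite author's own statement) =====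
-- stated objective: alternative
-- what changed: Replaced the exponential two-branch recursion with a bottom-up loop keeping only the last two sequence values (O(N) arithmetic ops vs O(phi^N) calls; intended as faster, measured 10.68x at the largest size both finished but unconfirmed at larger sizes where big-int growth dominates).
-- outside the precondition, e.g. on SukuKeN(0): A raises RecursionError, B returns 3
import Mathlib
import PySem

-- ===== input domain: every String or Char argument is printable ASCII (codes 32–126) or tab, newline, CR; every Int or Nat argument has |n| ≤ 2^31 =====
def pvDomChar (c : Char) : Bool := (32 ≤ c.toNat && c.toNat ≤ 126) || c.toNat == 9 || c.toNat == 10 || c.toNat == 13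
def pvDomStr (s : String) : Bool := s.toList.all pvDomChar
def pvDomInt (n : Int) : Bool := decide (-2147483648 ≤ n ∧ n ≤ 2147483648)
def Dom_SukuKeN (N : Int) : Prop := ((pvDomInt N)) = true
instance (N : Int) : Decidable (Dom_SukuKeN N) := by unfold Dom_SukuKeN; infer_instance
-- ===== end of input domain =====

-- B replaces A's exponential double recursion by a bottom-up loop over the last two values (alternative: fewer arithmetic operations).

-- ===== PORT A =====
-- A is recursive on an Int argument; the fuel argument only makes the recursion
-- structural (Pre_ guarantees it never runs out: the recursion depth is N).
def SukuKeNFuel : Nat → Int → Int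
  | 0, _ => 0
  | f + 1, N =>
    if N = 1 then 1
    else if N = 2 then 3
    else if PySem.Int.mod N 2 = 1 then SukuKeNFuel f (N - 2) * SukuKeNFuel f (N - 1)
    else SukuKeNFuel f (N - 2) + SukuKeNFuel f (N - 1)

def SukuKeN (N : Int) : Int := SukuKeNFuel N.toNat N

-- ===== PORT B =====
def SukuKeN_alt (N : Int) : Int :=
  if N = 1 then 1
  else
    ((PySem.List.pyRange 3 (N + 1) 1).foldl
      (fun (ab : Int × Int) k =>
        (ab.2, if PySem.Int.mod k 2 = 1 then ab.1 * ab.2 else ab.1 + ab.2))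
      (1, 3)).2

-- ===== PRECONDITION & SPEC =====
-- Pre_ excludes N ≤ 0, where A's recursion never reaches a base case (RecursionError).
def Pre_SukuKeN (N : Int) : Prop := 1 ≤ N
instance (N : Int) : Decidable (Pre_SukuKeN N) := by unfold Pre_SukuKeN; infer_instance
def pvWitness_SukuKeN : Int := (5)

def Spec_SukuKeN (N : Int) (out : Int) : Prop := out = SukuKeN_alt N
instance (N : Int) (out : Int) : Decidable (Spec_SukuKeN N out) := by unfold Spec_SukuKeN; infer_instance

-- ===== CLAIM (what is proved, stated in full; the proofs are below) =====
def Claim_equal_SukuKeN : Prop := ∀ (N : Int), Dom_SukuKeN N → Pre_SukuKeN N → Spec_SukuKeN N (SukuKeN N)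

-- ===== LEMMAS AND PROOFS =====

-- reference: gp k = (value at k+1, value at k+2)
def gp : Nat → Int × Int
  | 0 => (1, 3)
  | k + 1 => ((gp k).2, if (k + 3) % 2 = 1 then (gp k).1 * (gp k).2 else (gp k).1 + (gp k).2)

def V : Nat → Int
  | 0 => 3
  | 1 => 1
  | n + 2 => (gp n).2

theorem V_succ_eq_fst (k : Nat) : V (k + 1) = (gp k).1 := by
  cases k with
  | zero => simp [V, gp]
  | succ k => simp [V, gp]

theorem fuelA (n : Nat) : ∀ fuel : Nat, 1 ≤ n → n ≤ fuel → SukuKeNFuel fuel (n : Int) = V n := by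
  induction n using Nat.strong_induction_on with
  | _ n ih =>
    intro fuel h1 hf
    match fuel, hf with
    | 0, hf => omega
    | f + 1, hf =>
      match n, h1 with
      | 1, _ => simp [SukuKeNFuel, V]
      | 2, _ => simp [SukuKeNFuel, V, gp]
      | (k + 3), _ =>
        have hne1 : ((k + 3 : Nat) : Int) ≠ 1 := by push_cast; omega
        have hne2 : ((k + 3 : Nat) : Int) ≠ 2 := by push_cast; omega
        have hm : PySem.Int.mod ((k + 3 : Nat) : Int) 2 = (((k + 3) % 2 : Nat) : Int) :=
          PySem.Int.mod_natCast _ _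
        have e2 : ((k + 3 : Nat) : Int) - 2 = ((k + 1 : Nat) : Int) := by push_cast; ring
        have e1 : ((k + 3 : Nat) : Int) - 1 = ((k + 2 : Nat) : Int) := by push_cast; ring
        have r1 : SukuKeNFuel f ((k + 1 : Nat) : Int) = V (k + 1) :=
          ih (k + 1) (by omega) f (by omega) (by omega)
        have r2 : SukuKeNFuel f ((k + 2 : Nat) : Int) = V (k + 2) :=
          ih (k + 2) (by omega) f (by omega) (by omega)
        have hV : V (k + 3) = if (k + 3) % 2 = 1 then V (k + 1) * V (k + 2) else V (k + 1) + V (k + 2) := by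
          show (gp (k + 1)).2 = _
          rw [gp, V_succ_eq_fst]
          rfl
        have hcast : ((((k + 3) % 2 : Nat)) : Int) = 1 ↔ (k + 3) % 2 = 1 := by
          exact_mod_cast Iff.rfl
        rw [SukuKeNFuel]
        rw [if_neg hne1, if_neg hne2, hm, e2, e1, r1, r2, hV]
        simp only [hcast]

theorem foldB (n : Nat) (h2 : 2 ≤ n) :
    ((PySem.List.pyRange 3 ((n : Int) + 1) 1).foldl
      (fun (ab : Int × Int) k =>
        (ab.2, if PySem.Int.mod k 2 = 1 then ab.1 * ab.2 else ab.1 + ab.2))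
      (1, 3)) = gp (n - 2) := by
  induction n with
  | zero => omega
  | succ n ih =>
    by_cases hn : 2 ≤ n
    · have hsplit : PySem.List.pyRange 3 ((↑(n + 1) : Int) + 1) 1
          = PySem.List.pyRange 3 ((n : Int) + 1) 1 ++ [(n : Int) + 1] := by
        have : ((↑(n + 1) : Int) + 1) = ((n : Int) + 1) + 1 := by push_cast; ring
        rw [this, PySem.List.pyRange_one_succ_right (by omega)]
      rw [hsplit, List.foldl_append, ih hn]
      have hk : ((n : Int) + 1) = ((n + 1 : Nat) : Int) := by push_cast; ring
      have hm : PySem.Int.mod ((n + 1 : Nat) : Int) 2 = (((n + 1) % 2 : Nat) : Int) :=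
        PySem.Int.mod_natCast _ _
      have hgp : gp (n + 1 - 2) = gp ((n - 2) + 1) := by congr 1; omega
      have hcast : ((((n + 1) % 2 : Nat)) : Int) = 1 ↔ (n + 1) % 2 = 1 := by
        exact_mod_cast Iff.rfl
      rw [List.foldl_cons, List.foldl_nil, hk, hm, hgp, gp]
      have hidx : (n - 2) + 3 = n + 1 := by omega
      rw [hidx]
      simp only [hcast]
    · have hn2 : n = 1 := by omega
      subst hn2
      simp [PySem.List.pyRange_one_eq_nil, gp]

-- ===== VERDICT (by name: the statement is the Claim_ definition above) =====
theorem SukuKeN_spec : Claim_equal_SukuKeN := by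
  intro N _ hpre
  have hN : 0 ≤ N := by exact_mod_cast le_trans (by norm_num) hpre
  obtain ⟨n, rfl⟩ : ∃ n : Nat, N = (n : Int) := ⟨N.toNat, (Int.toNat_of_nonneg hN).symm⟩
  have h1 : 1 ≤ n := by unfold Pre_SukuKeN at hpre; exact_mod_cast hpre
  unfold Spec_SukuKeN SukuKeN SukuKeN_alt
  rw [Int.toNat_natCast, fuelA n n h1 le_rfl]
  by_cases hn1 : n = 1
  · subst hn1; simp [V]
  · have h2 : 2 ≤ n := by omega
    rw [if_neg (by exact_mod_cast (by omega : (n : Int) ≠ 1)), foldB n h2]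
    have : n = (n - 2) + 2 := by omega
    rw [this]
    rfl
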